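-- pv_equiv track=rewrite | github.com/twannylvsmusic-maker/Wordsearch-generator | utils/shape_masks.py | create_diamond_mask
-- ===== SOURCE A (Python) =====
-- def create_diamond_mask(size):
--     """Create a diamond-shaped mask."""
--     mask = []
--     center = size // 2
--
--     for i in range(size):
--         row = []
--         for j in range(size):
--             # Diamond: |x| + |y| <= center
--             distance = abs(i - center) + abs(j - center)
--             row.append(distance <= center)
--         mask.append(row)
--
--     return mask
-- ===== SOURCE B (Python) =====
-- def create_diamond_mask(size):
--     """Create a diamond-shaped mask."""
--     center = size // 2
--     mask = []
--     for i in range(size):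
--         di = abs(i - center)
--         count = min(size, 2 * center - di + 1) - di
--         mask.append([False] * di + [True] * count + [False] * (size - di - count))
--     return mask
-- ===== Notes on version B (the rewrite author's own statement) =====
-- stated objective: faster
-- what changed: Replaces the per-cell abs-distance test in the inner loop by per-row segment arithmetic: each diamond row is one contiguous True block, built with three replicate segments computed from the row index.
import Mathlib
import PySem

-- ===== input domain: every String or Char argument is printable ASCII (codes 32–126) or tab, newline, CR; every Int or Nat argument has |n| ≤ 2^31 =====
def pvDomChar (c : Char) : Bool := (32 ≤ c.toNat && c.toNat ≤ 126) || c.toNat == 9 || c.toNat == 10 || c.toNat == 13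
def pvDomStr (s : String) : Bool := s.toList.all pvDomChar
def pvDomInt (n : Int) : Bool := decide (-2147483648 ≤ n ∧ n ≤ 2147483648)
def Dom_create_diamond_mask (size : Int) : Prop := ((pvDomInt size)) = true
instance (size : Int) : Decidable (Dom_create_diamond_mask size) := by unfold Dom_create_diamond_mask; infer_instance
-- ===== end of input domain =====

-- B replaces A's per-cell abs-distance test by per-row segment arithmetic (each
-- diamond row is one contiguous True block built from three replicate segments).

-- ===== PORT A =====
def create_diamond_mask (size : Int) : List (List Bool) :=
  let center := PySem.Int.floordiv size 2
  (PySem.List.pyRange 0 size 1).foldl (fun mask i =>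
    mask ++ [(PySem.List.pyRange 0 size 1).foldl (fun row j =>
      row ++ [decide (|i - center| + |j - center| ≤ center)]) []]) []

-- ===== PORT B =====
def create_diamond_mask_alt (size : Int) : List (List Bool) :=
  let center := PySem.Int.floordiv size 2
  (PySem.List.pyRange 0 size 1).foldl (fun mask i =>
    let di := |i - center|
    let count := min size (2 * center - di + 1) - di
    mask ++ [List.replicate di.toNat false ++
             (List.replicate count.toNat true ++
              List.replicate (size - di - count).toNat false)]) []

-- ===== PRECONDITION & SPEC =====
def Spec_create_diamond_mask (size : Int) (out : List (List Bool)) : Prop := out = create_diamond_mask_alt size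
instance (size : Int) (out : List (List Bool)) : Decidable (Spec_create_diamond_mask size out) := by unfold Spec_create_diamond_mask; infer_instance

-- ===== CLAIM (what is proved, stated in full; the proofs are below) =====
def Claim_equal_create_diamond_mask : Prop := ∀ (size : Int), Dom_create_diamond_mask size → Spec_create_diamond_mask size (create_diamond_mask size)

-- ===== LEMMAS AND PROOFS =====

-- one row of the diamond: the per-cell tests form three constant segments
theorem diamond_row (size c i : Int) (hc : c = size / 2) (h0 : 0 ≤ i) (h1 : i < size) :
    (PySem.List.pyRange 0 size 1).map (fun j => decide (|i - c| + |j - c| ≤ c)) =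
      List.replicate (|i - c|).toNat false ++
      (List.replicate (min size (2 * c - |i - c| + 1) - |i - c|).toNat true ++
       List.replicate (size - |i - c| - (min size (2 * c - |i - c| + 1) - |i - c|)).toNat false) := by
  have hd0 : (0 : Int) ≤ |i - c| := abs_nonneg _
  have hdc := abs_choice (i - c)
  generalize hg : |i - c| = d at hd0 hdc ⊢
  apply List.ext_getElem
  · simp only [List.length_map, PySem.List.length_pyRange_one, List.length_append,
      List.length_replicate]
    rcases hdc with h | h <;> omega
  · intro k hk1 hk2
    rw [List.getElem_map, PySem.List.getElem_pyRange_one]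
    simp only [List.length_map, PySem.List.length_pyRange_one] at hk1
    have he0 : (0 : Int) ≤ |0 + (k : Int) - c| := abs_nonneg _
    have hec := abs_choice ((0 : Int) + (k : Int) - c)
    generalize hg2 : |(0 : Int) + (k : Int) - c| = e at he0 hec ⊢
    by_cases hA : (k : Int) < d
    · rw [List.getElem_append_left (by rw [List.length_replicate]; omega),
        List.getElem_replicate]
      simp only [decide_eq_false_iff_not, not_le]
      rcases hdc with h | h <;> rcases hec with h' | h' <;> omega
    · rw [List.getElem_append_right (by rw [List.length_replicate]; omega)]
      by_cases hB : (k : Int) < min size (2 * c - d + 1)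
      · rw [List.getElem_append_left (by simp only [List.length_replicate]; omega),
          List.getElem_replicate]
        simp only [decide_eq_true_eq]
        rcases hdc with h | h <;> rcases hec with h' | h' <;> omega
      · rw [List.getElem_append_right (by simp only [List.length_replicate]; omega),
          List.getElem_replicate]
        simp only [decide_eq_false_iff_not, not_le]
        rcases hdc with h | h <;> rcases hec with h' | h' <;> omega

-- ===== VERDICT (by name: the statement is the Claim_ definition above) =====
theorem create_diamond_mask_spec : Claim_equal_create_diamond_mask := by
  intro size _
  unfold Spec_create_diamond_mask create_diamond_mask create_diamond_mask_alt
  simp only [PySem.List.foldl_append_singleton_eq_map, List.nil_append]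
  apply List.map_congr_left
  intro i hi
  rw [PySem.List.mem_pyRange_one] at hi
  exact diamond_row size (PySem.Int.floordiv size 2) i
    (PySem.Int.floordiv_eq_ediv_of_pos (by omega)) hi.1 hi.2
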